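-- pv_equiv track=rewrite | github.com/aflackus/Retire | retireAgeCalc.py | getFullRetireYearMonth
-- ===== SOURCE A (Python) =====
-- def getFullRetireYearMonth(birthYear, birthMonth, retireYear, retireMonth):
--     retireYearDate = birthYear + retireYear
--     retireMonthDate = birthMonth
--     while retireMonth > 0:
--         retireMonthDate += 1
--         retireMonth -= 1
--         if retireMonthDate > 12:
--             retireMonthDate = 1
--             retireYearDate += 1
--     return retireYearDate, getMonthName(retireMonthDate)
--
-- def getMonthName(retireMonthDate):
--     if retireMonthDate == 1:
--         return "January"
--     elif retireMonthDate == 2: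
--         return "February"
--     elif retireMonthDate == 3:
--         return "March"
--     elif retireMonthDate == 4:
--         return "April"
--     elif retireMonthDate == 5:
--         return "May"
--     elif retireMonthDate == 6:
--         return "June"
--     elif retireMonthDate == 7:
--         return "July"
--     elif retireMonthDate == 8:
--         return "August"
--     elif retireMonthDate == 9:
--         return "September"
--     elif retireMonthDate == 10:
--         return "October"
--     elif retireMonthDate == 11:
--         return "November"
--     elif retireMonthDate == 12:
--         return "December"
--     else:
--         return "Error"
-- ===== SOURCE B (Python) =====
-- MONTH_NAMES = ("January", "February", "March", "April", "May", "June",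
--                "July", "August", "September", "October", "November", "December")
--
--
-- def getFullRetireYearMonth(birthYear, birthMonth, retireYear, retireMonth):
--     year = birthYear + retireYear
--     month = birthMonth
--     if retireMonth > 0:
--         month += retireMonth
--         if month > 12:
--             extra, rem = divmod(month - 1, 12)
--             year += extra
--             month = rem + 1
--     name = MONTH_NAMES[month - 1] if 1 <= month <= 12 else "Error"
--     return year, name
-- ===== Notes on version B (the rewrite author's own statement) =====
-- stated objective: faster
-- what changed: Replaces the per-month while-loop (increment, wrap at 12) by O(1) divmod arithmetic on the total month count and the 12-branch if/elif name chain by a tuple lookup; Pre_ excludes invalid birth months above 12 combined with a positive retireMonth, where A's wrap-to-January on the first added month is an accidental convention and B's plain divmod wrap is equally defensible.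
-- outside the precondition, e.g. on getFullRetireYearMonth(1990, 13, 30, 1): A returns (2021, 'January'), B returns (2021, 'February')
import Mathlib
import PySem

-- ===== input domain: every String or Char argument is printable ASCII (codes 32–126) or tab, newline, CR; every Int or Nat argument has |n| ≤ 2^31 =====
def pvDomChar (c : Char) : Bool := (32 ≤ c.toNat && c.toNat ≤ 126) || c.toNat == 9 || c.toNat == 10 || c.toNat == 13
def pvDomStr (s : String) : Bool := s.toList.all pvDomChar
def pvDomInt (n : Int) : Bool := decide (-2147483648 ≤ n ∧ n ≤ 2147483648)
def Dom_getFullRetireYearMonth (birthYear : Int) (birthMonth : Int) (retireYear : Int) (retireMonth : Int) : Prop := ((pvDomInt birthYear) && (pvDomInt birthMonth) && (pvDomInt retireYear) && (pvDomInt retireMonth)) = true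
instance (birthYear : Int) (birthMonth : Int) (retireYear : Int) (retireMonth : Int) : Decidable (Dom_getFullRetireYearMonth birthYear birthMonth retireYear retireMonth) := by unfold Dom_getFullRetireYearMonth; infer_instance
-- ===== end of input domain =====

-- B replaces A's per-month wrap loop by divmod arithmetic on the total month count and the if/elif name chain by a list lookup; Pre_ excludes invalid birth months above 12 combined with a positive retireMonth (see the sentence above Pre_).

-- ===== PORT A =====
def getMonthName (retireMonthDate : Int) : String :=
  if retireMonthDate = 1 then "January"
  else if retireMonthDate = 2 then "February"
  else if retireMonthDate = 3 then "March"
  else if retireMonthDate = 4 then "April"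
  else if retireMonthDate = 5 then "May"
  else if retireMonthDate = 6 then "June"
  else if retireMonthDate = 7 then "July"
  else if retireMonthDate = 8 then "August"
  else if retireMonthDate = 9 then "September"
  else if retireMonthDate = 10 then "October"
  else if retireMonthDate = 11 then "November"
  else if retireMonthDate = 12 then "December"
  else "Error"

-- the 'while retireMonth > 0' loop of A, step for step
def pvLoopA (retireMonth retireMonthDate retireYearDate : Int) : Int × Int :=
  if retireMonth > 0 then
    let d := retireMonthDate + 1
    if d > 12 then pvLoopA (retireMonth - 1) 1 (retireYearDate + 1)
    else pvLoopA (retireMonth - 1) d retireYearDate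
  else (retireYearDate, retireMonthDate)
termination_by retireMonth.toNat
decreasing_by all_goals omega

def getFullRetireYearMonth (birthYear : Int) (birthMonth : Int) (retireYear : Int) (retireMonth : Int) : Int × String :=
  let r := pvLoopA retireMonth birthMonth (birthYear + retireYear)
  (r.1, getMonthName r.2)

-- ===== PORT B =====
def pvMonthNames : List String :=
  ["January", "February", "March", "April", "May", "June",
   "July", "August", "September", "October", "November", "December"]

-- Source B: MONTH_NAMES[month - 1] if 1 <= month <= 12 else "Error"  (index is in range under the guard)
def pvMonthNameB (month : Int) : String :=
  if 1 ≤ month ∧ month ≤ 12 then (PySem.List.pyGet? pvMonthNames (month - 1)).getD "Error"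
  else "Error"

def getFullRetireYearMonth_alt (birthYear : Int) (birthMonth : Int) (retireYear : Int) (retireMonth : Int) : Int × String :=
  let year := birthYear + retireYear
  let ym :=
    if retireMonth > 0 then
      let month := birthMonth + retireMonth
      if month > 12 then
        (year + PySem.Int.floordiv (month - 1) 12, PySem.Int.mod (month - 1) 12 + 1)
      else (year, month)
    else (year, birthMonth)
  (ym.1, pvMonthNameB ym.2)

-- ===== PRECONDITION & SPEC =====
-- Pre_ excludes exactly birthMonth > 12 with retireMonth > 0: a calendar month above 12 is invalid
-- input, and there A's wrap-to-January on the first added month is an accidental convention of its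
-- while-loop, no more specified than B's plain divmod wrap.
def Pre_getFullRetireYearMonth (birthYear : Int) (birthMonth : Int) (retireYear : Int) (retireMonth : Int) : Prop :=
  retireMonth ≤ 0 ∨ birthMonth ≤ 12
instance (birthYear : Int) (birthMonth : Int) (retireYear : Int) (retireMonth : Int) : Decidable (Pre_getFullRetireYearMonth birthYear birthMonth retireYear retireMonth) := by unfold Pre_getFullRetireYearMonth; infer_instance

def pvWitness_getFullRetireYearMonth : Int × Int × Int × Int := (1960, 4, 45, 30)

def Spec_getFullRetireYearMonth (birthYear : Int) (birthMonth : Int) (retireYear : Int) (retireMonth : Int) (out : Int × String) : Prop := out = getFullRetireYearMonth_alt birthYear birthMonth retireYear retireMonth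
instance (birthYear : Int) (birthMonth : Int) (retireYear : Int) (retireMonth : Int) (out : Int × String) : Decidable (Spec_getFullRetireYearMonth birthYear birthMonth retireYear retireMonth out) := by unfold Spec_getFullRetireYearMonth; infer_instance

-- ===== CLAIM (what is proved, stated in full; the proofs are below) =====
def Claim_equal_getFullRetireYearMonth : Prop := ∀ (birthYear : Int) (birthMonth : Int) (retireYear : Int) (retireMonth : Int), Dom_getFullRetireYearMonth birthYear birthMonth retireYear retireMonth → Pre_getFullRetireYearMonth birthYear birthMonth retireYear retireMonth → Spec_getFullRetireYearMonth birthYear birthMonth retireYear retireMonth (getFullRetireYearMonth birthYear birthMonth retireYear retireMonth)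

-- ===== LEMMAS AND PROOFS =====

-- both month-name functions agree on every Int
lemma monthName_eq (m : Int) : getMonthName m = pvMonthNameB m := by
  by_cases h : 1 ≤ m ∧ m ≤ 12
  · obtain ⟨h1, h2⟩ := h
    interval_cases m <;> decide
  · rw [getMonthName, pvMonthNameB,
        if_neg (show ¬(1 ≤ m ∧ m ≤ 12) from h),
        if_neg (show ¬m = 1 by omega), if_neg (show ¬m = 2 by omega),
        if_neg (show ¬m = 3 by omega), if_neg (show ¬m = 4 by omega),
        if_neg (show ¬m = 5 by omega), if_neg (show ¬m = 6 by omega),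
        if_neg (show ¬m = 7 by omega), if_neg (show ¬m = 8 by omega),
        if_neg (show ¬m = 9 by omega), if_neg (show ¬m = 10 by omega),
        if_neg (show ¬m = 11 by omega), if_neg (show ¬m = 12 by omega)]

-- closed form of A's loop for a Nat iteration count and a start month ≤ 12
lemma loopA_closed (n : Nat) : ∀ (month year : Int), month ≤ 12 →
    pvLoopA (n : Int) month year =
      if 0 < (n : Int) ∧ month + n > 12 then
        (year + (month + n - 1) / 12, (month + n - 1) % 12 + 1)
      else (year, month + n) := by
  induction n with
  | zero => intro month year h; rw [pvLoopA]; simp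
  | succ k ih =>
    intro month year h
    rw [pvLoopA]
    have hpos : ((k + 1 : Nat) : Int) > 0 := by push_cast; omega
    rw [if_pos hpos]
    by_cases hd : month + 1 > 12
    · have hm : month = 12 := by omega
      have hk : ((k + 1 : Nat) : Int) - 1 = (k : Int) := by push_cast; omega
      rw [if_pos hd, hk, ih 1 (year + 1) (by omega)]
      subst hm
      split_ifs <;> (rw [Prod.mk.injEq]; constructor <;> push_cast <;> omega)
    · have hk : ((k + 1 : Nat) : Int) - 1 = (k : Int) := by push_cast; omega
      rw [if_neg hd, hk, ih (month + 1) year (by omega)]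
      split_ifs <;> (rw [Prod.mk.injEq]; constructor <;> push_cast <;> omega)

-- the same closed form for an Int count ≥ 0
lemma loopA_closed' (rm month year : Int) (h : month ≤ 12) (h0 : 0 ≤ rm) :
    pvLoopA rm month year =
      if 0 < rm ∧ month + rm > 12 then
        (year + (month + rm - 1) / 12, (month + rm - 1) % 12 + 1)
      else (year, month + rm) := by
  have : rm = ((rm.toNat : Nat) : Int) := by omega
  rw [this, loopA_closed rm.toNat month year h]

-- ===== VERDICT (by name: the statement is the Claim_ definition above) =====
theorem getFullRetireYearMonth_spec : Claim_equal_getFullRetireYearMonth := by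
  intro birthYear birthMonth retireYear retireMonth _ hpre
  unfold Spec_getFullRetireYearMonth getFullRetireYearMonth getFullRetireYearMonth_alt
  by_cases hrm : retireMonth > 0
  · have hbm : birthMonth ≤ 12 := by
      rcases hpre with h | h
      · omega
      · exact h
    simp only [if_pos hrm]
    rw [loopA_closed' retireMonth birthMonth (birthYear + retireYear) hbm (by omega)]
    rw [PySem.Int.floordiv_eq_ediv_of_pos (by omega), PySem.Int.mod_eq_emod_of_pos (by omega)]
    split_ifs <;> refine Prod.ext ?_ ?_ <;> simp only [monthName_eq] <;>
      first | rfl | omega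
  · simp only [if_neg hrm]
    rw [pvLoopA, if_neg hrm]
    exact Prod.ext rfl (monthName_eq _)
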